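-- pv_equiv track=rewrite | github.com/CupelLabs/notebooks | federal-ai-contracts-2026/analyze_contracts.py | categorize_contract
-- ===== SOURCE A (Python) =====
-- def categorize_contract(desc):
-- 	desc = str(desc).upper()
-- 	categories = []
--
-- 	# Strong AI indicators
-- 	if any(term in desc for term in ['MACHINE LEARNING', 'DEEP LEARNING', 'NEURAL NETWORK',
-- 		'NATURAL LANGUAGE PROCESSING', 'NLP', 'COMPUTER VISION',
-- 		'AUTONOMOUS', 'PREDICTIVE MODEL', 'ALGORITHM']):
-- 		categories.append('SPECIFIC_AI_TECH')
--
-- 	# Generic AI mention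
-- 	if 'ARTIFICIAL INTELLIGENCE' in desc or ' AI ' in desc or desc.startswith('AI '):
-- 		categories.append('AI_MENTIONED')
--
-- 	# IT services patterns
-- 	if any(term in desc for term in ['IT SUPPORT', 'IT SERVICES', 'HELP DESK',
-- 		'INFORMATION TECHNOLOGY SUPPORT', 'PROGRAMMATIC SUPPORT',
-- 		'ADVISORY AND ASSISTANCE', 'MANAGEMENT SUPPORT']):
-- 		categories.append('IT_SERVICES')
--
-- 	# R&D
-- 	if any(term in desc for term in ['RESEARCH', 'R&D', 'PROTOTYPE', 'DEVELOP']):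
-- 		categories.append('RD_DEVELOPMENT')
--
-- 	# Cloud/infrastructure
-- 	if any(term in desc for term in ['CLOUD', 'DATA CENTER', 'INFRASTRUCTURE', 'HOSTING']):
-- 		categories.append('CLOUD_INFRA')
--
-- 	# Cybersecurity
-- 	if any(term in desc for term in ['CYBER', 'SECURITY', 'THREAT']):
-- 		categories.append('CYBERSECURITY')
--
-- 	if not categories:
-- 		categories.append('UNCLEAR')
--
-- 	return categories
-- ===== SOURCE B (Python) =====
-- # Inverted flat term->bit table: one OR-accumulating scan builds a category
-- # bitmask, then a decode stage maps mask bits back to labels.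
-- TERM_BITS = (
--     [(t, 1) for t in ['MACHINE LEARNING', 'DEEP LEARNING', 'NEURAL NETWORK',
--         'NATURAL LANGUAGE PROCESSING', 'NLP', 'COMPUTER VISION',
--         'AUTONOMOUS', 'PREDICTIVE MODEL', 'ALGORITHM']]
--     + [('ARTIFICIAL INTELLIGENCE', 2), (' AI ', 2)]
--     + [(t, 4) for t in ['IT SUPPORT', 'IT SERVICES', 'HELP DESK',
--         'INFORMATION TECHNOLOGY SUPPORT', 'PROGRAMMATIC SUPPORT',
--         'ADVISORY AND ASSISTANCE', 'MANAGEMENT SUPPORT']]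
--     + [(t, 8) for t in ['RESEARCH', 'R&D', 'PROTOTYPE', 'DEVELOP']]
--     + [(t, 16) for t in ['CLOUD', 'DATA CENTER', 'INFRASTRUCTURE', 'HOSTING']]
--     + [(t, 32) for t in ['CYBER', 'SECURITY', 'THREAT']]
-- )
--
-- LABELS = ['SPECIFIC_AI_TECH', 'AI_MENTIONED', 'IT_SERVICES',
--           'RD_DEVELOPMENT', 'CLOUD_INFRA', 'CYBERSECURITY']
--
-- def categorize_contract(desc):
--     d = str(desc).upper()
--     mask = 0
--     for term, bit in TERM_BITS:
--         if term in d: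
--             mask |= bit
--     if d.startswith('AI '):  # prefix form of the generic AI mention
--         mask |= 2
--     labels = [lab for i, lab in enumerate(LABELS) if (mask >> i) & 1]
--     return labels or ['UNCLEAR']
-- ===== Notes on version B (the rewrite author's own statement) =====
-- stated objective: alternative
-- what changed: Replaced six per-category branches by an inverted flat term-to-bit table: one OR-accumulating scan builds a category bitmask, then a separate decode stage maps mask bits back to the ordered labels.
import Mathlib
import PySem

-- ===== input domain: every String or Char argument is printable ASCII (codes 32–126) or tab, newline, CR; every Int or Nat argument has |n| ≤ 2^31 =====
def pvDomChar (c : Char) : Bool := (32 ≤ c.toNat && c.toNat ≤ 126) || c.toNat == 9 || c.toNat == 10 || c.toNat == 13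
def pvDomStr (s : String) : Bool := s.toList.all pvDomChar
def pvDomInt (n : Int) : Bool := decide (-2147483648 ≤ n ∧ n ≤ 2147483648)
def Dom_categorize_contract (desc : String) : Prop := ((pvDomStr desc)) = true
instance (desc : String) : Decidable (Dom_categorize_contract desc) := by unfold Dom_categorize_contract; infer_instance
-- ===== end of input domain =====

-- B replaces six per-category branches by an inverted flat term->bit table: one OR-accumulating scan builds a category bitmask, then a decode stage maps bits back to the ordered labels (alternative decomposition, same cost).


-- ===== PORT A =====
def categorize_contract (desc : String) : List String :=
  let desc := PySem.Str.upper desc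
  let categories : List String := []
  let categories := if (["MACHINE LEARNING", "DEEP LEARNING", "NEURAL NETWORK",
      "NATURAL LANGUAGE PROCESSING", "NLP", "COMPUTER VISION",
      "AUTONOMOUS", "PREDICTIVE MODEL", "ALGORITHM"].any fun t => PySem.Str.isIn t desc)
    then categories ++ ["SPECIFIC_AI_TECH"] else categories
  let categories := if PySem.Str.isIn "ARTIFICIAL INTELLIGENCE" desc || PySem.Str.isIn " AI " desc || PySem.Str.startswith desc "AI "
    then categories ++ ["AI_MENTIONED"] else categories
  let categories := if (["IT SUPPORT", "IT SERVICES", "HELP DESK",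
      "INFORMATION TECHNOLOGY SUPPORT", "PROGRAMMATIC SUPPORT",
      "ADVISORY AND ASSISTANCE", "MANAGEMENT SUPPORT"].any fun t => PySem.Str.isIn t desc)
    then categories ++ ["IT_SERVICES"] else categories
  let categories := if (["RESEARCH", "R&D", "PROTOTYPE", "DEVELOP"].any fun t => PySem.Str.isIn t desc)
    then categories ++ ["RD_DEVELOPMENT"] else categories
  let categories := if (["CLOUD", "DATA CENTER", "INFRASTRUCTURE", "HOSTING"].any fun t => PySem.Str.isIn t desc)
    then categories ++ ["CLOUD_INFRA"] else categories
  let categories := if (["CYBER", "SECURITY", "THREAT"].any fun t => PySem.Str.isIn t desc)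
    then categories ++ ["CYBERSECURITY"] else categories
  let categories := if categories.isEmpty then categories ++ ["UNCLEAR"] else categories
  categories

-- ===== PORT B =====
-- B's inverted flat table: each substring term paired with its category's bit
def pvTermBits : List (String × Nat) :=
  [("MACHINE LEARNING", 1), ("DEEP LEARNING", 1), ("NEURAL NETWORK", 1),
   ("NATURAL LANGUAGE PROCESSING", 1), ("NLP", 1), ("COMPUTER VISION", 1),
   ("AUTONOMOUS", 1), ("PREDICTIVE MODEL", 1), ("ALGORITHM", 1),
   ("ARTIFICIAL INTELLIGENCE", 2), (" AI ", 2),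
   ("IT SUPPORT", 4), ("IT SERVICES", 4), ("HELP DESK", 4),
   ("INFORMATION TECHNOLOGY SUPPORT", 4), ("PROGRAMMATIC SUPPORT", 4),
   ("ADVISORY AND ASSISTANCE", 4), ("MANAGEMENT SUPPORT", 4),
   ("RESEARCH", 8), ("R&D", 8), ("PROTOTYPE", 8), ("DEVELOP", 8),
   ("CLOUD", 16), ("DATA CENTER", 16), ("INFRASTRUCTURE", 16), ("HOSTING", 16),
   ("CYBER", 32), ("SECURITY", 32), ("THREAT", 32)]

def pvLabels : List String :=
  ["SPECIFIC_AI_TECH", "AI_MENTIONED", "IT_SERVICES",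
   "RD_DEVELOPMENT", "CLOUD_INFRA", "CYBERSECURITY"]

def categorize_contract_alt (desc : String) : List String :=
  let d := PySem.Str.upper desc
  let mask := pvTermBits.foldl (fun (m : Nat) (p : String × Nat) => if PySem.Str.isIn p.1 d then m ||| p.2 else m) 0
  let mask := if PySem.Str.startswith d "AI " then mask ||| 2 else mask
  -- [lab for i, lab in enumerate(LABELS) if (mask >> i) & 1]
  let labels := (PySem.List.enumerate pvLabels).flatMap fun p =>
    if ((mask >>> p.1.toNat) &&& 1) != 0 then [p.2] else []
  if labels.isEmpty then ["UNCLEAR"] else labels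

-- ===== PRECONDITION & SPEC =====
def Spec_categorize_contract (desc : String) (out : List String) : Prop := out = categorize_contract_alt desc
instance (desc : String) (out : List String) : Decidable (Spec_categorize_contract desc out) := by unfold Spec_categorize_contract; infer_instance

-- ===== CLAIM (what is proved, stated in full; the proofs are below) =====
def Claim_equal_categorize_contract : Prop := ∀ (desc : String), Dom_categorize_contract desc → Spec_categorize_contract desc (categorize_contract desc)

-- ===== LEMMAS AND PROOFS =====

-- the six rule outcomes on the uppercased text; pvC2Base is the substring part of the AI rule
def pvC1Base (d : String) : Bool := ["MACHINE LEARNING", "DEEP LEARNING", "NEURAL NETWORK",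
  "NATURAL LANGUAGE PROCESSING", "NLP", "COMPUTER VISION",
  "AUTONOMOUS", "PREDICTIVE MODEL", "ALGORITHM"].any fun t => PySem.Str.isIn t d
def pvC2Base (d : String) : Bool := PySem.Str.isIn "ARTIFICIAL INTELLIGENCE" d || PySem.Str.isIn " AI " d
def pvC3Base (d : String) : Bool := ["IT SUPPORT", "IT SERVICES", "HELP DESK",
  "INFORMATION TECHNOLOGY SUPPORT", "PROGRAMMATIC SUPPORT",
  "ADVISORY AND ASSISTANCE", "MANAGEMENT SUPPORT"].any fun t => PySem.Str.isIn t d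
def pvC4Base (d : String) : Bool := ["RESEARCH", "R&D", "PROTOTYPE", "DEVELOP"].any fun t => PySem.Str.isIn t d
def pvC5Base (d : String) : Bool := ["CLOUD", "DATA CENTER", "INFRASTRUCTURE", "HOSTING"].any fun t => PySem.Str.isIn t d
def pvC6Base (d : String) : Bool := ["CYBER", "SECURITY", "THREAT"].any fun t => PySem.Str.isIn t d

-- bit i of the OR-accumulating fold = "some entry with bit i matched"
theorem pv_testBit_foldl (d : String) (l : List (String × Nat)) (a : Nat) (i : Nat) :
    (l.foldl (fun (m : Nat) (p : String × Nat) => if PySem.Str.isIn p.1 d then m ||| p.2 else m) a).testBit i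
      = (a.testBit i || l.any fun p => PySem.Str.isIn p.1 d && p.2.testBit i) := by
  induction l generalizing a with
  | nil => simp
  | cons h t ih =>
    rw [List.foldl_cons, ih, List.any_cons]
    by_cases hc : PySem.Str.isIn h.1 d = true
    · simp only [hc, if_true, Bool.true_and, Nat.testBit_or, Bool.or_assoc]
    · simp only [hc, Bool.false_and, Bool.false_or]
      simp [hc]

-- the decode-stage condition is testBit
theorem pv_decode_bit (m i : Nat) : (((m >>> i) &&& 1) != 0) = m.testBit i := by
  simp [Nat.testBit, Nat.and_comm]

theorem pv_base_bit0 (d : String) :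
    (pvTermBits.foldl (fun (m : Nat) (p : String × Nat) => if PySem.Str.isIn p.1 d then m ||| p.2 else m) 0).testBit 0
      = pvC1Base d := by
  rw [pv_testBit_foldl]
  simp [pvTermBits, pvC1Base, show Nat.testBit 1 0 = true from by decide, show Nat.testBit 2 0 = false from by decide, show Nat.testBit 4 0 = false from by decide, show Nat.testBit 8 0 = false from by decide, show Nat.testBit 16 0 = false from by decide, show Nat.testBit 32 0 = false from by decide]

theorem pv_base_bit1 (d : String) :
    (pvTermBits.foldl (fun (m : Nat) (p : String × Nat) => if PySem.Str.isIn p.1 d then m ||| p.2 else m) 0).testBit 1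
      = pvC2Base d := by
  rw [pv_testBit_foldl]
  simp [pvTermBits, pvC2Base, show Nat.testBit 1 1 = false from by decide, show Nat.testBit 2 1 = true from by decide, show Nat.testBit 4 1 = false from by decide, show Nat.testBit 8 1 = false from by decide, show Nat.testBit 16 1 = false from by decide, show Nat.testBit 32 1 = false from by decide]

theorem pv_base_bit2 (d : String) :
    (pvTermBits.foldl (fun (m : Nat) (p : String × Nat) => if PySem.Str.isIn p.1 d then m ||| p.2 else m) 0).testBit 2
      = pvC3Base d := by
  rw [pv_testBit_foldl]
  simp [pvTermBits, pvC3Base, show Nat.testBit 1 2 = false from by decide, show Nat.testBit 2 2 = false from by decide, show Nat.testBit 4 2 = true from by decide, show Nat.testBit 8 2 = false from by decide, show Nat.testBit 16 2 = false from by decide, show Nat.testBit 32 2 = false from by decide]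

theorem pv_base_bit3 (d : String) :
    (pvTermBits.foldl (fun (m : Nat) (p : String × Nat) => if PySem.Str.isIn p.1 d then m ||| p.2 else m) 0).testBit 3
      = pvC4Base d := by
  rw [pv_testBit_foldl]
  simp [pvTermBits, pvC4Base, show Nat.testBit 1 3 = false from by decide, show Nat.testBit 2 3 = false from by decide, show Nat.testBit 4 3 = false from by decide, show Nat.testBit 8 3 = true from by decide, show Nat.testBit 16 3 = false from by decide, show Nat.testBit 32 3 = false from by decide]

theorem pv_base_bit4 (d : String) :
    (pvTermBits.foldl (fun (m : Nat) (p : String × Nat) => if PySem.Str.isIn p.1 d then m ||| p.2 else m) 0).testBit 4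
      = pvC5Base d := by
  rw [pv_testBit_foldl]
  simp [pvTermBits, pvC5Base, show Nat.testBit 1 4 = false from by decide, show Nat.testBit 2 4 = false from by decide, show Nat.testBit 4 4 = false from by decide, show Nat.testBit 8 4 = false from by decide, show Nat.testBit 16 4 = true from by decide, show Nat.testBit 32 4 = false from by decide]

theorem pv_base_bit5 (d : String) :
    (pvTermBits.foldl (fun (m : Nat) (p : String × Nat) => if PySem.Str.isIn p.1 d then m ||| p.2 else m) 0).testBit 5
      = pvC6Base d := by
  rw [pv_testBit_foldl]
  simp [pvTermBits, pvC6Base, show Nat.testBit 1 5 = false from by decide, show Nat.testBit 2 5 = false from by decide, show Nat.testBit 4 5 = false from by decide, show Nat.testBit 8 5 = false from by decide, show Nat.testBit 16 5 = false from by decide, show Nat.testBit 32 5 = true from by decide]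


-- both ports abstracted over the six rule outcomes
def pvAShape (c1 c2 c3 c4 c5 c6 : Bool) : List String :=
  let categories : List String := []
  let categories := if c1 then categories ++ ["SPECIFIC_AI_TECH"] else categories
  let categories := if c2 then categories ++ ["AI_MENTIONED"] else categories
  let categories := if c3 then categories ++ ["IT_SERVICES"] else categories
  let categories := if c4 then categories ++ ["RD_DEVELOPMENT"] else categories
  let categories := if c5 then categories ++ ["CLOUD_INFRA"] else categories
  let categories := if c6 then categories ++ ["CYBERSECURITY"] else categories
  let categories := if categories.isEmpty then categories ++ ["UNCLEAR"] else categories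
  categories

def pvBShape (c1 c2 c3 c4 c5 c6 : Bool) : List String :=
  let labels := (if c1 then ["SPECIFIC_AI_TECH"] else []) ++ ((if c2 then ["AI_MENTIONED"] else []) ++
    ((if c3 then ["IT_SERVICES"] else []) ++ ((if c4 then ["RD_DEVELOPMENT"] else []) ++
    ((if c5 then ["CLOUD_INFRA"] else []) ++ ((if c6 then ["CYBERSECURITY"] else []) ++ [])))))
  if labels.isEmpty then ["UNCLEAR"] else labels

theorem pvShapes_eq : ∀ (c1 c2 c3 c4 c5 c6 : Bool),
    pvAShape c1 c2 c3 c4 c5 c6 = pvBShape c1 c2 c3 c4 c5 c6 := by decide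

theorem pvA_eq (desc : String) :
    categorize_contract desc
      = pvAShape (pvC1Base (PySem.Str.upper desc))
          (pvC2Base (PySem.Str.upper desc) || PySem.Str.startswith (PySem.Str.upper desc) "AI ")
          (pvC3Base (PySem.Str.upper desc)) (pvC4Base (PySem.Str.upper desc))
          (pvC5Base (PySem.Str.upper desc)) (pvC6Base (PySem.Str.upper desc)) := rfl

theorem pvB_eq (desc : String) :
    categorize_contract_alt desc
      = pvBShape (pvC1Base (PySem.Str.upper desc))
          (pvC2Base (PySem.Str.upper desc) || PySem.Str.startswith (PySem.Str.upper desc) "AI ")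
          (pvC3Base (PySem.Str.upper desc)) (pvC4Base (PySem.Str.upper desc))
          (pvC5Base (PySem.Str.upper desc)) (pvC6Base (PySem.Str.upper desc)) := by
  unfold categorize_contract_alt
  generalize PySem.Str.upper desc = d
  show (let mask := pvTermBits.foldl (fun (m : Nat) (p : String × Nat) => if PySem.Str.isIn p.1 d then m ||| p.2 else m) 0
        let mask := if PySem.Str.startswith d "AI " then mask ||| 2 else mask
        let labels := (PySem.List.enumerate pvLabels).flatMap fun p =>
          if ((mask >>> p.1.toNat) &&& 1) != 0 then [p.2] else []
        if labels.isEmpty then ["UNCLEAR"] else labels) = _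
  have hb0 := pv_base_bit0 d
  have hb1 := pv_base_bit1 d
  have hb2 := pv_base_bit2 d
  have hb3 := pv_base_bit3 d
  have hb4 := pv_base_bit4 d
  have hb5 := pv_base_bit5 d
  by_cases hs : PySem.Str.startswith d "AI " = true
  · simp only [hs, eq_self_iff_true, if_true, pvLabels,
      PySem.List.enumerate_cons, PySem.List.enumerate_nil, List.flatMap_cons, List.flatMap_nil,
      Int.toNat_zero, show ((0:Int)+1).toNat = 1 from by decide, show ((0:Int)+1+1).toNat = 2 from by decide, show ((0:Int)+1+1+1).toNat = 3 from by decide, show ((0:Int)+1+1+1+1).toNat = 4 from by decide, show ((0:Int)+1+1+1+1+1).toNat = 5 from by decide,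
      pv_decode_bit, Nat.testBit_or, show Nat.testBit 2 0 = false from by decide, show Nat.testBit 2 1 = true from by decide, show Nat.testBit 2 2 = false from by decide, show Nat.testBit 2 3 = false from by decide, show Nat.testBit 2 4 = false from by decide, show Nat.testBit 2 5 = false from by decide,
      hb0, hb1, hb2, hb3, hb4, hb5, Bool.or_true, Bool.or_false]
    generalize pvC1Base d = c1
    generalize pvC2Base d = c2
    generalize pvC3Base d = c3
    generalize pvC4Base d = c4
    generalize pvC5Base d = c5
    generalize pvC6Base d = c6
    revert c1 c2 c3 c4 c5 c6
    decide
  · rw [Bool.not_eq_true] at hs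
    simp only [hs, Bool.false_eq_true, if_false, pvLabels,
      PySem.List.enumerate_cons, PySem.List.enumerate_nil, List.flatMap_cons, List.flatMap_nil,
      Int.toNat_zero, show ((0:Int)+1).toNat = 1 from by decide, show ((0:Int)+1+1).toNat = 2 from by decide, show ((0:Int)+1+1+1).toNat = 3 from by decide, show ((0:Int)+1+1+1+1).toNat = 4 from by decide, show ((0:Int)+1+1+1+1+1).toNat = 5 from by decide,
      pv_decode_bit, hb0, hb1, hb2, hb3, hb4, hb5, Bool.or_true, Bool.or_false]
    generalize pvC1Base d = c1
    generalize pvC2Base d = c2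
    generalize pvC3Base d = c3
    generalize pvC4Base d = c4
    generalize pvC5Base d = c5
    generalize pvC6Base d = c6
    revert c1 c2 c3 c4 c5 c6
    decide

-- ===== VERDICT (by name: the statement is the Claim_ definition above) =====
theorem categorize_contract_spec : Claim_equal_categorize_contract := by
  intro desc _
  show categorize_contract desc = categorize_contract_alt desc
  rw [pvA_eq, pvB_eq]
  exact pvShapes_eq _ _ _ _ _ _
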